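-- pv_equiv track=rewrite | github.com/Meenaali/Butterfly_V2 | backend/protein_intelligence.py | longest_hydrophobic_run
-- ===== SOURCE A (Python) =====
-- def longest_hydrophobic_run(sequence: str) -> int:
--     hydrophobic = set("AILMFWYV")
--     longest = 0
--     current = 0
--     for residue in sequence:
--         if residue in hydrophobic:
--             current += 1
--             longest = max(longest, current)
--         else:
--             current = 0
--     return longest
-- ===== SOURCE B (Python) =====
-- import re
--
-- def longest_hydrophobic_run(sequence: str) -> int:
--     # Tokenize into maximal hydrophobic runs, then take the longest.
--     return max((len(m) for m in re.findall(r'[AILMFWYV]+', sequence)), default=0)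
-- ===== Notes on version B (the rewrite author's own statement) =====
-- stated objective: idiomatic
-- what changed: Replaces the per-residue running-counter loop with a regex tokenization into maximal hydrophobic runs followed by a max over run lengths (default 0).
import Mathlib
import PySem

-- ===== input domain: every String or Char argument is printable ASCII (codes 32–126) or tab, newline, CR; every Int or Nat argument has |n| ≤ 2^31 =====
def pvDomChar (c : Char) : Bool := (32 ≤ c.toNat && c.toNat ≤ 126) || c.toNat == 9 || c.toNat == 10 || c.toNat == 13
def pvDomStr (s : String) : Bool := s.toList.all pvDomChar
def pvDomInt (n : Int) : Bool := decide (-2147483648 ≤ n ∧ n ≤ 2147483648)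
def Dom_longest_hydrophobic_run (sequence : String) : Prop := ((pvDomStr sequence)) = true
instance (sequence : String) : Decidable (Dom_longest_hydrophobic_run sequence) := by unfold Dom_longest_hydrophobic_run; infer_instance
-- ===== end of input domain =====

-- B tokenizes the sequence into maximal hydrophobic runs (re.findall) and takes the max length,
-- instead of A's running counter; proved equal on all inputs (both total).


-- ===== PORT A =====
def hydroA : PySem.Set Char := PySem.Set.ofList "AILMFWYV".toList

def longest_hydrophobic_run (sequence : String) : Int :=
  (sequence.toList.foldl
    (fun (st : Int × Int) residue =>
      if PySem.Set.contains hydroA residue then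
        (max st.1 (st.2 + 1), st.2 + 1)
      else
        (st.1, 0))
    (0, 0)).1

-- ===== PORT B =====
-- the regex character class [AILMFWYV]
def hydroB (c : Char) : Bool := "AILMFWYV".toList.contains c

-- hand port of re.findall(r'[AILMFWYV]+', s), kept as the LENGTH of each maximal run
-- (B only uses len(m)); exact for this char-class regex: matches are the maximal runs,
-- left to right.
def pvRuns : List Char → List Int
  | [] => []
  | [c] => if hydroB c then [1] else []
  | c :: d :: cs =>
      let r := pvRuns (d :: cs)
      if hydroB c then
        if hydroB d then (r.headD 0 + 1) :: r.drop 1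
        else 1 :: r
      else r

def longest_hydrophobic_run_alt (sequence : String) : Int :=
  (pvRuns sequence.toList).foldl max 0

-- ===== PRECONDITION & SPEC =====
def Spec_longest_hydrophobic_run (sequence : String) (out : Int) : Prop := out = longest_hydrophobic_run_alt sequence
instance (sequence : String) (out : Int) : Decidable (Spec_longest_hydrophobic_run sequence out) := by unfold Spec_longest_hydrophobic_run; infer_instance

-- ===== CLAIM (what is proved, stated in full; the proofs are below) =====
def Claim_equal_longest_hydrophobic_run : Prop := ∀ (sequence : String), Dom_longest_hydrophobic_run sequence → Spec_longest_hydrophobic_run sequence (longest_hydrophobic_run sequence)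

-- ===== LEMMAS AND PROOFS =====

-- the two membership tests agree
theorem hydro_eq (c : Char) : PySem.Set.contains hydroA c = hydroB c := by
  simp [hydroA, hydroB, PySem.Set.contains_eq_listContains]

-- length of the leading hydrophobic run
def pvLead (l : List Char) : Int := ((l.takeWhile hydroB).length : Int)

theorem pvLead_cons (c : Char) (cs : List Char) :
    pvLead (c :: cs) = if hydroB c then 1 + pvLead cs else 0 := by
  by_cases h : hydroB c = true
  · simp [pvLead, List.takeWhile, h]
    omega
  · simp [pvLead, List.takeWhile, h]

theorem pvLead_nonneg (l : List Char) : 0 ≤ pvLead l := by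
  simp [pvLead]

theorem foldl_max_max (t : List Int) : ∀ a b : Int,
    t.foldl max (max a b) = max a (t.foldl max b) := by
  induction t with
  | nil => intro a b; simp
  | cons x t ih =>
      intro a b
      simp only [List.foldl]
      rw [max_assoc, ih]

theorem foldl_max_cons (x : Int) (t : List Int) :
    (x :: t).foldl max 0 = max x (t.foldl max 0) := by
  simp only [List.foldl]
  rw [show max (0:Int) x = max x 0 by omega, foldl_max_max]

theorem foldl_max_nonneg (l : List Int) : 0 ≤ l.foldl max 0 := by
  induction l with
  | nil => simp
  | cons x t ih => rw [foldl_max_cons]; omega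

-- a hydrophobic-headed list's first run has length 1 + lead of the tail
theorem pvRuns_hydro : ∀ (cs : List Char) (d : Char), hydroB d = true →
    ∃ t, pvRuns (d :: cs) = (1 + pvLead cs) :: t := by
  intro cs
  induction cs with
  | nil => intro d hd; exact ⟨[], by simp [pvRuns, pvLead, hd]⟩
  | cons e cs' ih =>
      intro d hd
      by_cases he : hydroB e = true
      · obtain ⟨t, ht⟩ := ih e he
        refine ⟨t, ?_⟩
        simp only [pvRuns, hd, he, if_pos, ht, List.headD, List.drop, pvLead_cons]
        congr 1
        omega
      · refine ⟨pvRuns (e :: cs'), ?_⟩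
        simp [pvRuns, hd, he, pvLead_cons]

theorem maxRuns_cons (c : Char) (cs : List Char) :
    (pvRuns (c :: cs)).foldl max 0 =
      if hydroB c then max (1 + pvLead cs) ((pvRuns cs).foldl max 0)
      else (pvRuns cs).foldl max 0 := by
  by_cases hc : hydroB c = true
  · cases cs with
    | nil => simp [pvRuns, pvLead, hc]
    | cons d cs' =>
        by_cases hd : hydroB d = true
        · obtain ⟨t, ht⟩ := pvRuns_hydro cs' d hd
          have hx : 0 ≤ pvLead cs' := pvLead_nonneg cs'
          simp only [pvRuns, hc, hd, if_pos, ht]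
          simp only [List.headD, List.drop, pvLead_cons, hd, if_pos]
          rw [foldl_max_cons, foldl_max_cons]
          omega
        · simp only [pvRuns, hc, hd, if_pos]
          simp only [Bool.false_eq_true, if_false, pvLead_cons, hd]
          rw [foldl_max_cons]
          have := foldl_max_nonneg (pvRuns (d :: cs'))
          simp
  · cases cs with
    | nil => simp [pvRuns, hc]
    | cons d cs' => simp [pvRuns, hc]

theorem pvLead_le_maxRuns (l : List Char) : pvLead l ≤ (pvRuns l).foldl max 0 := by
  cases l with
  | nil => simp [pvLead, pvRuns]
  | cons c cs =>
      rw [maxRuns_cons, pvLead_cons]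
      have h1 := foldl_max_nonneg (pvRuns cs)
      split <;> omega

-- invariant of A's loop
theorem loopA_eq : ∀ (l : List Char) (L C : Int), 0 ≤ C → C ≤ L →
    (l.foldl
      (fun (st : Int × Int) residue =>
        if hydroB residue then
          (max st.1 (st.2 + 1), st.2 + 1)
        else
          (st.1, 0))
      (L, C)).1 = max L (max (C + pvLead l) ((pvRuns l).foldl max 0)) := by
  intro l
  induction l with
  | nil =>
      intro L C h0 hCL
      simp [pvRuns, pvLead]
      omega
  | cons c cs ih =>
      intro L C h0 hCL
      simp only [List.foldl]
      rw [maxRuns_cons, pvLead_cons]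
      by_cases hc : hydroB c = true
      · simp only [hc, if_pos]
        rw [ih (max L (C + 1)) (C + 1) (by omega) (by omega)]
        have h1 := pvLead_nonneg cs
        have h2 := foldl_max_nonneg (pvRuns cs)
        omega
      · simp only [hc, Bool.false_eq_true, if_false]
        rw [ih L 0 le_rfl (by omega)]
        have h1 := pvLead_le_maxRuns cs
        have h2 := foldl_max_nonneg (pvRuns cs)
        omega

-- ===== VERDICT (by name: the statement is the Claim_ definition above) =====
theorem longest_hydrophobic_run_spec : Claim_equal_longest_hydrophobic_run := by
  intro sequence _
  show longest_hydrophobic_run sequence = longest_hydrophobic_run_alt sequence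
  unfold longest_hydrophobic_run longest_hydrophobic_run_alt
  simp only [hydro_eq]
  rw [loopA_eq sequence.toList 0 0 le_rfl le_rfl]
  have h1 := pvLead_le_maxRuns sequence.toList
  have h2 := foldl_max_nonneg (pvRuns sequence.toList)
  omega
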